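-- pv_equiv track=rewrite | github.com/PSJ0705/Python_codingtest | Python3/프로그래머스/1/133502. 햄버거 만들기/햄버거 만들기.py | solution
-- ===== SOURCE A (Python) =====
-- def solution(ingre):
--     answer = 0
--     sample = [1,2,3,1]
--     box = []
--     i = 0
--
--     while i <= len(ingre):
--         j = i
--         box.append(ingre[i:i+4])
--         if sample in box:
--             del ingre[i:i+4]
--             box = []
--             answer += 1
--             i = j - 4
--             continue
--         else:
--             box = []
--             i += 1
--     return answer
-- ===== SOURCE B (Python) =====
-- def solution(ingre):
--     st = []
--     answer = 0
--     for x in ingre: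
--         st.append(x)
--         if st[-4:] == [1, 2, 3, 1]:
--             del st[-4:]
--             answer += 1
--     return answer
-- ===== Notes on version B (the rewrite author's own statement) =====
-- stated objective: faster
-- what changed: replaced the rescanning while-loop with index backtracking and repeated list slicing/deletion by a single-pass stack that pops when its top four elements are [1,2,3,1]
import Mathlib
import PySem

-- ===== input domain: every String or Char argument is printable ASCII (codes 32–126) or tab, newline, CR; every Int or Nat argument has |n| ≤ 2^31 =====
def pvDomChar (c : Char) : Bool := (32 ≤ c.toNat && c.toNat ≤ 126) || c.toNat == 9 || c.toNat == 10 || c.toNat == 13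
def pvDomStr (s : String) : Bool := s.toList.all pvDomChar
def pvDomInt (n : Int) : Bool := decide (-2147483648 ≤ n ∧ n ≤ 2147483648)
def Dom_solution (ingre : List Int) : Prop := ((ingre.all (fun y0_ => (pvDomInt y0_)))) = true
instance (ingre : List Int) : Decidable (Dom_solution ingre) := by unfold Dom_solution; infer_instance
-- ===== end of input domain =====

-- B replaces A's rescanning loop (index backtracking + slice deletion) by a one-pass stack; objective: faster.
-- Python A mutates `ingre` in place (del ingre[i:i+4]); B does not. The equivalence proved is about the RETURN value only.

-- ===== PORT A =====
-- termination helper for the deletion branch: the deleted slice has 4 elements, so the list shrinks by 4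
theorem pvA_del_len (l : List Int) (i : Int)
    (h : PySem.List.slice l (some i) (some (i+4)) = [1,2,3,1]) :
    (PySem.List.slice l none (some i) ++ PySem.List.slice l (some (i+4)) none).length + 4
      = l.length := by
  have hlen := congrArg List.length h
  rw [PySem.List.length_slice] at hlen
  have hc1 : PySem.List.clampIdx l.length i ≤ l.length := PySem.List.clampIdx_le _ _
  have hc2 : PySem.List.clampIdx l.length (i+4) ≤ l.length := PySem.List.clampIdx_le _ _
  have e1 : PySem.List.slice l none (some i) = PySem.List.slice l (some 0) (some i) := by
    rw [PySem.List.slice_zero_start]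
  have l1 : (PySem.List.slice l none (some i)).length
      = PySem.List.clampIdx l.length i := by
    rw [e1, PySem.List.length_slice]
    have : PySem.List.clampIdx l.length 0 = 0 := by
      have := PySem.List.clampIdx_natCast l.length 0
      simpa using this
    omega
  have l2 : (PySem.List.slice l (some (i+4)) none).length
      = l.length - PySem.List.clampIdx l.length (i+4) := by
    rw [PySem.List.slice_some_none]; simp
  have hlen' : PySem.List.clampIdx l.length (i+4) - PySem.List.clampIdx l.length i = 4 := by
    simpa using hlen
  rw [List.length_append, l1, l2]
  omega

def solLoopA (ingre : List Int) (i : Int) (answer : Int) : Int :=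
  if _hle : i ≤ (ingre.length : Int) then
    let j := i
    let box : List (List Int) := [] ++ [PySem.List.slice ingre (some i) (some (i+4))]
    if hmem : [1,2,3,1] ∈ box then
      solLoopA (PySem.List.slice ingre none (some i) ++ PySem.List.slice ingre (some (i+4)) none)
        (j - 4) (answer + 1)
    else
      solLoopA ingre (i + 1) answer
  else
    answer
termination_by (ingre.length, (ingre.length + 1 - i).toNat)
decreasing_by
  · apply Prod.Lex.left
    have hm : PySem.List.slice ingre (some i) (some (i+4)) = [1,2,3,1] := by
      have := hmem; simp [box] at this; exact this.symm
    have := pvA_del_len ingre i hm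
    omega
  · apply Prod.Lex.right
    omega

def solution (ingre : List Int) : Int := solLoopA ingre 0 0

-- ===== PORT B =====
def stepB (p : List Int × Int) (x : Int) : List Int × Int :=
  if PySem.List.slice (p.1 ++ [x]) (some (-4)) none = [1, 2, 3, 1] then
    (PySem.List.slice (p.1 ++ [x]) none (some (-4)), p.2 + 1)
  else
    (p.1 ++ [x], p.2)

def solution_alt (ingre : List Int) : Int :=
  (ingre.foldl stepB ([], 0)).2

-- ===== PRECONDITION & SPEC =====
def Spec_solution (ingre : List Int) (out : Int) : Prop := out = solution_alt ingre
instance (ingre : List Int) (out : Int) : Decidable (Spec_solution ingre out) := by unfold Spec_solution; infer_instance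

-- ===== CLAIM (what is proved, stated in full; the proofs are below) =====
def Claim_equal_solution : Prop := ∀ (ingre : List Int), Dom_solution ingre → Spec_solution ingre (solution ingre)

-- ===== LEMMAS AND PROOFS =====

-- the pattern
def pvPat : List Int := [1, 2, 3, 1]

-- stepB's test is "pvPat is a suffix of the pushed stack"
theorem pv_cond_iff (st : List Int) :
    PySem.List.slice st (some (-4)) none = pvPat ↔ pvPat <:+ st := by
  rw [PySem.List.slice_from_neg_ofNat st 4 (by omega)]
  constructor
  · intro h
    rw [← h]; exact List.drop_suffix _ _
  · rintro ⟨u, rfl⟩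
    have : (u ++ pvPat).length - 4 = u.length := by simp [pvPat]
    rw [this, List.drop_left]

theorem pv_stepB_eq (st : List Int) (c : Int) (x : Int) :
    stepB (st, c) x =
      if pvPat <:+ (st ++ [x]) then ((st ++ [x]).take ((st ++ [x]).length - 4), c + 1)
      else (st ++ [x], c) := by
  unfold stepB
  dsimp only
  rw [PySem.List.slice_to_neg_ofNat (st ++ [x]) 4 (by omega)]
  simp only [show ([1,2,3,1] : List Int) = pvPat from rfl]
  by_cases h : pvPat <:+ (st ++ [x])
  · rw [if_pos ((pv_cond_iff (st ++ [x])).2 h), if_pos h]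
  · rw [if_neg (fun hc => h ((pv_cond_iff (st ++ [x])).1 hc)), if_neg h]

-- the count component is additive in the initial count
theorem pv_count_add (l : List Int) (st : List Int) (c : Int) :
    List.foldl stepB (st, c) l
      = ((List.foldl stepB (st, 0) l).1, c + (List.foldl stepB (st, 0) l).2) := by
  induction l generalizing st c with
  | nil => simp
  | cons x xs ih =>
    simp only [List.foldl_cons]
    have hc : stepB (st, c) x = ((stepB (st, 0) x).1, c + (stepB (st, 0) x).2) := by
      unfold stepB
      dsimp only
      split_ifs <;> simp
    rw [hc, ih ((stepB (st, 0) x).1) (c + (stepB (st, 0) x).2),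
      ih ((stepB (st, 0) x).1) ((stepB (st, 0) x).2)]
    simp only [Prod.mk.injEq]
    exact ⟨trivial, by ring⟩

-- on a pattern-free list the stack just accumulates and the count is unchanged
theorem pv_run_clean (l : List Int) (c : Int) (h : ¬ pvPat <:+: l) :
    List.foldl stepB ([], c) l = (l, c) := by
  induction l using List.reverseRecOn with
  | nil => simp
  | append_singleton xs x ih =>
    have hxs' : ¬ pvPat <:+: xs := fun hi => h (List.IsInfix.trans hi ⟨[], [x], by simp⟩)
    rw [List.foldl_append, ih hxs', List.foldl_cons, List.foldl_nil, pv_stepB_eq]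
    rw [if_neg (fun hs => h hs.isInfix)]

-- occurrence of the pattern at position q
def pvOcc (l : List Int) (q : Nat) : Prop := (l.drop q).take 4 = pvPat

theorem pv_infix_occ {l : List Int} (h : pvPat <:+: l) : ∃ q, pvOcc l q ∧ q + 4 ≤ l.length := by
  rcases h with ⟨u, v, rfl⟩
  refine ⟨u.length, ?_, by simp [pvPat]⟩
  unfold pvOcc
  rw [List.append_assoc, List.drop_left]
  simp [pvPat]

theorem pv_occ_le {l : List Int} {q : Nat} (h : pvOcc l q) : q + 4 ≤ l.length := by
  have := congrArg List.length h
  simp [pvPat] at this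
  omega

-- running the stack through T ++ pvPat, where T is pattern-free and no occurrence crosses into T
theorem pv_run_pop (T : List Int)
    (hT : ¬ pvPat <:+: T)
    (hcross : ¬ pvPat <:+ (T ++ [1])) :
    List.foldl stepB ([], (0:Int)) (T ++ pvPat) = (T, 1) := by
  rw [List.foldl_append, pv_run_clean T 0 hT]
  show List.foldl stepB (T, 0) [1,2,3,1] = (T, 1)
  simp only [List.foldl_cons, List.foldl_nil]
  rw [pv_stepB_eq T 0 1, if_neg hcross]
  rw [pv_stepB_eq (T ++ [1]) 0 2]
  rw [if_neg ?n2]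
  rw [pv_stepB_eq (T ++ [1] ++ [2]) 0 3, if_neg ?n3]
  rw [pv_stepB_eq (T ++ [1] ++ [2] ++ [3]) 0 1, if_pos ?p4]
  · have harr : T ++ [1] ++ [2] ++ [3] ++ [1] = T ++ pvPat := by simp [pvPat]
    rw [harr]
    have hl : (T ++ pvPat).length - 4 = T.length := by simp [pvPat]
    rw [hl, List.take_left]
    norm_num
  case n2 =>
    rintro ⟨u, hu⟩
    have := congrArg List.getLast? hu
    simp [pvPat] at this
  case n3 =>
    rintro ⟨u, hu⟩
    have := congrArg List.getLast? hu
    simp [pvPat] at this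
  case p4 =>
    exact ⟨T, by simp [pvPat]⟩

-- no occurrence of the pattern before position i
def pvInv (l : List Int) (i : Int) : Prop := ∀ q : Nat, (q : Int) < i → ¬ pvOcc l q

-- a slice starting at a (small) negative index is too short to be the pattern
theorem pv_neg_no_match (l : List Int) (i : Int) (h1 : -4 ≤ i) (h2 : i < 0) :
    PySem.List.slice l (some i) (some (i+4)) ≠ [1,2,3,1] := by
  intro h
  have hlen := congrArg List.length h
  rw [PySem.List.length_slice] at hlen
  have h04 : (0:Int) ≤ i + 4 := by omega
  have he : i + 4 = (((i+4).toNat : Nat) : Int) := by omega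
  have hc : PySem.List.clampIdx l.length (i+4) ≤ (i+4).toNat := by
    rw [he, PySem.List.clampIdx_natCast]; omega
  have : (i+4).toNat ≤ 3 := by omega
  simp at hlen
  omega

-- the key counting lemma: deleting the leftmost occurrence decrements the stack count
theorem pv_cnt_del (l : List Int) (p : Nat)
    (hocc : pvOcc l p) (hleft : ∀ q, q < p → ¬ pvOcc l q) :
    (List.foldl stepB (([]:List Int), (0:Int)) l).2
      = 1 + (List.foldl stepB (([]:List Int), (0:Int)) (l.take p ++ l.drop (p+4))).2 := by
  have hple : p + 4 ≤ l.length := pv_occ_le hocc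
  set T := l.take p with hTdef
  set R := l.drop (p+4) with hRdef
  have hTlen : T.length = p := by simp [hTdef]; omega
  have hsplit : l = T ++ pvPat ++ R := by
    have h1 : l = T ++ l.drop p := by simp [hTdef]
    have h2 : l.drop p = pvPat ++ R := by
      have : l.drop p = (l.drop p).take 4 ++ (l.drop p).drop 4 := by simp
      rw [this, hocc, hRdef, List.drop_drop]
    rw [List.append_assoc, ← h2, ← h1]
  have hT : ¬ pvPat <:+: T := by
    intro hi
    rcases pv_infix_occ hi with ⟨q, hq, hql⟩
    apply hleft q (by omega)
    unfold pvOcc at hq ⊢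
    have : l.drop q = T.drop q ++ (pvPat ++ R) := by
      rw [hsplit, List.append_assoc, List.drop_append_of_le_length (by omega)]
    rw [this, List.take_append_of_le_length (by simp [hTlen]; omega), hq]
  have hcross : ¬ pvPat <:+ (T ++ [1]) := by
    rintro ⟨u, hu⟩
    have hu' : u ++ [(1:Int),2,3] = T := by
      have : (u ++ [(1:Int),2,3]) ++ [1] = T ++ [1] := by simpa [pvPat] using hu
      exact List.append_cancel_right this
    have hul : u.length + 3 = p := by
      have := congrArg List.length hu'
      simp [hTlen] at this
      omega
    apply hleft u.length (by omega)
    unfold pvOcc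
    have : l.drop u.length = [(1:Int),2,3] ++ pvPat ++ R := by
      rw [hsplit, ← hu', List.append_assoc, List.append_assoc,
        List.drop_append_of_le_length (by omega)]
      simp
    rw [this]
    simp [pvPat]
  have hmain : List.foldl stepB (([]:List Int), (0:Int)) l = List.foldl stepB (T, 1) R := by
    rw [hsplit, List.foldl_append, pv_run_pop T hT hcross]
  have hdel : List.foldl stepB (([]:List Int), (0:Int)) (T ++ R) = List.foldl stepB (T, 0) R := by
    rw [List.foldl_append, pv_run_clean T 0 hT]
  rw [hmain, hdel, pv_count_add R T 1]

-- pattern-free lists yield count 0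
theorem pv_cnt_clean (l : List Int) (h : ∀ q : Nat, ¬ pvOcc l q) :
    (List.foldl stepB (([]:List Int), (0:Int)) l).2 = 0 := by
  have hni : ¬ pvPat <:+: l := by
    intro hi
    rcases pv_infix_occ hi with ⟨q, hq, _⟩
    exact h q hq
  rw [pv_run_clean l 0 hni]

-- main loop invariant
theorem pv_main (l : List Int) (i : Int) (ans : Int) :
    -4 ≤ i → pvInv l i →
    solLoopA l i ans = ans + (List.foldl stepB (([]:List Int), (0:Int)) l).2 := by
  induction l, i, ans using solLoopA.induct with
  | case1 l i ans hle j box hmem ih =>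
    -- deletion branch
    intro h4 hinv
    have hm : PySem.List.slice l (some i) (some (i+4)) = [1,2,3,1] := by
      have := hmem; simp [box] at this; exact this.symm
    have hi0 : 0 ≤ i := by
      by_contra hneg
      exact pv_neg_no_match l i h4 (by omega) hm
    set p := i.toNat with hp
    have hip : i = (p : Int) := by omega
    have hocc : pvOcc l p := by
      unfold pvOcc
      rw [← PySem.List.slice_natCast_add l p 4]
      rw [show ((p:Int)) = i from hip.symm]
      rw [show (((4:Nat)):Int) = (4:Int) from by norm_num]
      exact hm
    have hple : p + 4 ≤ l.length := pv_occ_le hocc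
    have hleft : ∀ q, q < p → ¬ pvOcc l q := fun q hq => hinv q (by omega)
    have hslices :
        PySem.List.slice l none (some i) ++ PySem.List.slice l (some (i+4)) none
          = l.take p ++ l.drop (p+4) := by
      rw [hip, PySem.List.slice_to _ (by omega), PySem.List.slice_from _ (by omega)]
      have e1 : ((p:Int)).toNat = p := by omega
      have e2 : (((p:Int)) + 4).toNat = p + 4 := by omega
      rw [e1, e2]
    have hinv' : pvInv (l.take p ++ l.drop (p+4)) (i - 4) := by
      intro q hq hoc
      apply hleft q (by omega)
      unfold pvOcc at hoc ⊢
      have hql : q + 5 ≤ p := by omega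
      have h1 : (l.take p ++ l.drop (p+4)).drop q = (l.take p).drop q ++ l.drop (p+4) := by
        rw [List.drop_append_of_le_length (by simp; omega)]
      have h2 : ((l.take p).drop q).take 4 = (l.drop q).take 4 := by
        rw [List.drop_take, List.take_take]
        congr 1
        omega
      rw [h1, List.take_append_of_le_length (by simp; omega), h2] at hoc
      exact hoc
    have hIH := ih (by omega) (by rw [hslices]; exact hinv')
    rw [hslices] at hIH
    rw [solLoopA, dif_pos hle, dif_pos hmem, hslices, hIH,
      pv_cnt_del l p hocc hleft]
    ring
  | case2 l i ans hle box hmem ih =>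
    -- advance branch
    intro h4 hinv
    have hm : PySem.List.slice l (some i) (some (i+4)) ≠ [1,2,3,1] := by
      intro he
      exact hmem (by simp [box, he])
    rw [solLoopA, dif_pos hle, dif_neg hmem]
    apply ih (by omega)
    intro q hq hoc
    by_cases hqi : (q : Int) < i
    · exact hinv q hqi hoc
    · have hqe : (q : Int) = i := by omega
      apply hm
      rw [← hqe]
      rw [show ((q:Int) + 4) = ((q:Int) + (((4:Nat)):Int)) from by norm_num]
      rw [PySem.List.slice_natCast_add l q 4]
      exact hoc
  | case3 l i ans hle =>
    intro h4 hinv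
    rw [solLoopA, dif_neg hle]
    have hno : ∀ q : Nat, ¬ pvOcc l q := by
      intro q hoc
      have := pv_occ_le hoc
      refine hinv q ?_ hoc
      omega
    rw [pv_cnt_clean l hno]
    ring

-- ===== VERDICT (by name: the statement is the Claim_ definition above) =====
theorem solution_spec : Claim_equal_solution := by
  intro ingre _
  unfold Spec_solution solution solution_alt
  have := pv_main ingre 0 0 (by omega) (fun q hq _ => by omega)
  simpa using this
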